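-- pv_equiv track=rewrite | github.com/aakashrawat1910/Password-Strength-Checker | password_strength_checker.py | get_password_strength_feedback
-- ===== SOURCE A (Python) =====
-- import string
--
-- def check_password_strength(password):
--
--     criteria_checks = []
--
--     # Check minimum length
--     if len(password) < 8:
--         criteria_checks.append("Password must be at least 8 characters long")
--
--     # Check for uppercase letters
--     if not any(c.isupper() for c in password):
--         criteria_checks.append("Password must contain at least one uppercase letter")
--
--     # Check for lowercase letters
--     if not any(c.islower() for c in password):
--         criteria_checks.append("Password must contain at least one lowercase letter")
--
--     # Check for digits
--     if not any(c.isdigit() for c in password):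
--         criteria_checks.append("Password must contain at least one digit")
--
--     # Check for special characters
--     special_chars = set(string.punctuation)
--     if not any(c in special_chars for c in password):
--         criteria_checks.append("Password must contain at least one special character")
--
--     # Password is strong if no criteria were failed
--     is_strong = len(criteria_checks) == 0
--
--     return is_strong, criteria_checks
--
-- def get_password_strength_feedback(password):
--
--     is_strong, failed_criteria = check_password_strength(password)
--
--     if is_strong:
--         return "Strong password! All security criteria are met."
--     else:
--         feedback = "Password is not strong enough. Please address the following:\n"
--         for criterion in failed_criteria:
--             feedback += f"- {criterion}\n"
--         return feedback
-- ===== SOURCE B (Python) =====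
-- import string
--
--
-- def get_password_strength_feedback(password):
--     # One pass over the password sets all four character-class flags at once,
--     # then the failed-criteria messages are selected from a table.
--     specials = set(string.punctuation)
--     has_upper = has_lower = has_digit = has_special = False
--     for c in password:
--         if c.isupper():
--             has_upper = True
--         if c.islower():
--             has_lower = True
--         if c.isdigit():
--             has_digit = True
--         if c in specials:
--             has_special = True
--
--     table = [
--         (len(password) >= 8, "Password must be at least 8 characters long"),
--         (has_upper, "Password must contain at least one uppercase letter"),
--         (has_lower, "Password must contain at least one lowercase letter"),
--         (has_digit, "Password must contain at least one digit"),
--         (has_special, "Password must contain at least one special character"),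
--     ]
--     msgs = [msg for ok, msg in table if not ok]
--
--     if not msgs:
--         return "Strong password! All security criteria are met."
--     return ("Password is not strong enough. Please address the following:\n"
--             + "".join("- " + m + "\n" for m in msgs))
-- ===== Notes on version B (the rewrite author's own statement) =====
-- stated objective: alternative
-- what changed: B replaces A's four independent any() scans with a single pass that sets four flags, and builds the failed-criteria list by filtering a (flag, message) table instead of sequential conditional appends; the feedback string is assembled with a join instead of a += loop.
import Mathlib
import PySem

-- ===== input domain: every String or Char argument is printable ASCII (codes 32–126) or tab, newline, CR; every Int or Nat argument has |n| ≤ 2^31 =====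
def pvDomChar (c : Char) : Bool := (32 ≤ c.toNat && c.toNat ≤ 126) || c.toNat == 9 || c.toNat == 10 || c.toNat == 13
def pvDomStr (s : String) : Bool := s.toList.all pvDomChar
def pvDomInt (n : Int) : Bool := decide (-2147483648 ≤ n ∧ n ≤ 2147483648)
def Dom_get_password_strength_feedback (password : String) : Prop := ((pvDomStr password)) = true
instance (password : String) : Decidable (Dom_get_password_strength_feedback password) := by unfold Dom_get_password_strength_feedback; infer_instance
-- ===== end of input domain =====

-- B sets the four character-class flags in one pass and builds the failed-criteria
-- list by filtering a (flag, message) table; A runs four separate any() scans and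
-- appends conditionally. Objective: alternative (same O(n) cost, different structure).


-- ===== PORT A =====
-- string.punctuation
def pvPunct : List Char := "!\"#$%&'()*+,-./:;<=>?@[\\]^_`{|}~".toList

def check_password_strength (password : String) : Bool × List String :=
  let cs := password.toList
  let criteria_checks : List String := []
  let criteria_checks :=
    if cs.length < 8 then criteria_checks ++ ["Password must be at least 8 characters long"]
    else criteria_checks
  let criteria_checks :=
    if !(cs.any PySem.Chars.isupper) then
      criteria_checks ++ ["Password must contain at least one uppercase letter"]
    else criteria_checks
  let criteria_checks :=
    if !(cs.any PySem.Chars.islower) then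
      criteria_checks ++ ["Password must contain at least one lowercase letter"]
    else criteria_checks
  let criteria_checks :=
    if !(cs.any PySem.Chars.isdigit) then
      criteria_checks ++ ["Password must contain at least one digit"]
    else criteria_checks
  let special_chars : PySem.Set Char := PySem.Set.ofList pvPunct
  let criteria_checks :=
    if !(cs.any (fun c => PySem.Set.contains special_chars c)) then
      criteria_checks ++ ["Password must contain at least one special character"]
    else criteria_checks
  let is_strong := criteria_checks.length == 0
  (is_strong, criteria_checks)

def get_password_strength_feedback (password : String) : String :=
  let r := check_password_strength password
  let is_strong := r.1
  let failed_criteria := r.2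
  if is_strong then "Strong password! All security criteria are met."
  else
    let feedback := "Password is not strong enough. Please address the following:\n"
    failed_criteria.foldl (fun fb criterion => fb ++ ("- " ++ criterion ++ "\n")) feedback

-- ===== PORT B =====
-- one pass: fold the four flags over the characters
def pvFlagsStep (s : Bool × Bool × Bool × Bool) (c : Char) : Bool × Bool × Bool × Bool :=
  let s := if PySem.Chars.isupper c then (true, s.2.1, s.2.2.1, s.2.2.2) else s
  let s := if PySem.Chars.islower c then (s.1, true, s.2.2.1, s.2.2.2) else s
  let s := if PySem.Chars.isdigit c then (s.1, s.2.1, true, s.2.2.2) else s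
  let s := if PySem.Set.contains (PySem.Set.ofList pvPunct) c then (s.1, s.2.1, s.2.2.1, true) else s
  s

def get_password_strength_feedback_alt (password : String) : String :=
  let cs := password.toList
  let flags := cs.foldl pvFlagsStep (false, false, false, false)
  let table : List (Bool × String) :=
    [ (decide (8 ≤ cs.length), "Password must be at least 8 characters long"),
      (flags.1, "Password must contain at least one uppercase letter"),
      (flags.2.1, "Password must contain at least one lowercase letter"),
      (flags.2.2.1, "Password must contain at least one digit"),
      (flags.2.2.2, "Password must contain at least one special character") ]
  let msgs := (table.filter (fun p => !p.1)).map (fun p => p.2)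
  if msgs.isEmpty then "Strong password! All security criteria are met."
  else
    "Password is not strong enough. Please address the following:\n"
      ++ String.join (msgs.map (fun m => "- " ++ m ++ "\n"))

-- ===== PRECONDITION & SPEC =====
def Spec_get_password_strength_feedback (password : String) (out : String) : Prop := out = get_password_strength_feedback_alt password
instance (password : String) (out : String) : Decidable (Spec_get_password_strength_feedback password out) := by unfold Spec_get_password_strength_feedback; infer_instance

-- ===== CLAIM (what is proved, stated in full; the proofs are below) =====
def Claim_equal_get_password_strength_feedback : Prop := ∀ (password : String), Dom_get_password_strength_feedback password → Spec_get_password_strength_feedback password (get_password_strength_feedback password)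

-- ===== LEMMAS AND PROOFS =====

-- the one-pass flag fold computes the four any-scans
theorem pvFlags_eq (cs : List Char) (a b c d : Bool) :
    cs.foldl pvFlagsStep (a, b, c, d) =
      (a || cs.any PySem.Chars.isupper,
       b || cs.any PySem.Chars.islower,
       c || cs.any PySem.Chars.isdigit,
       d || cs.any (fun ch => PySem.Set.contains (PySem.Set.ofList pvPunct) ch)) := by
  induction cs generalizing a b c d with
  | nil => simp
  | cons x xs ih =>
    simp only [List.foldl_cons, List.any_cons, pvFlagsStep]
    cases h1 : PySem.Chars.isupper x <;> cases h2 : PySem.Chars.islower x <;>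
    cases h3 : PySem.Chars.isdigit x <;>
    cases h4 : PySem.Set.contains (PySem.Set.ofList pvPunct) x <;>
    simp [ih]

theorem get_password_strength_feedback_eq (password : String) :
    get_password_strength_feedback password = get_password_strength_feedback_alt password := by
  unfold get_password_strength_feedback get_password_strength_feedback_alt check_password_strength
  simp only [pvFlags_eq, Bool.false_or, String.length_toList]
  by_cases h8 : password.length < 8
  · have h8' : ¬ (8 ≤ password.length) := by omega
    rw [if_pos h8]
    cases hu : password.toList.any PySem.Chars.isupper <;>
    cases hw : password.toList.any PySem.Chars.islower <;>
    cases hd : password.toList.any PySem.Chars.isdigit <;>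
    cases hs : password.toList.any (fun ch => PySem.Set.contains (PySem.Set.ofList pvPunct) ch) <;>
    simp_all [String.join]
  · have h8' : 8 ≤ password.length := by omega
    rw [if_neg h8]
    cases hu : password.toList.any PySem.Chars.isupper <;>
    cases hw : password.toList.any PySem.Chars.islower <;>
    cases hd : password.toList.any PySem.Chars.isdigit <;>
    cases hs : password.toList.any (fun ch => PySem.Set.contains (PySem.Set.ofList pvPunct) ch) <;>
    simp_all [String.join]

-- ===== VERDICT (by name: the statement is the Claim_ definition above) =====
theorem get_password_strength_feedback_spec : Claim_equal_get_password_strength_feedback := by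
  intro password _
  exact get_password_strength_feedback_eq password
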